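-- pv_equiv track=rewrite | github.com/pakxe/coding-test | 프로그래머스/1/160586. 대충 만든 자판/대충 만든 자판.py | solution
-- ===== SOURCE A (Python) =====
-- def solution(keymap, targets):
--     s = set()
--     for i in range(len(keymap)):
--         for j in range(len(keymap[i])):
--             c = keymap[i][j]
--             s.add(c)
--
--     keym = {}
--     for i in range(len(keymap)):
--         for j in range(len(keymap[i])):
--             c = keymap[i][j]
--
--             if c in keym:
--                 keym[c] = min(keym[c], j + 1)
--             else:
--                 keym[c] = j + 1
--
--     res = []
--     for i in range(len(targets)):
--         is_able = True
--         count = 0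
--         for j in range(len(targets[i])):
--             c = targets[i][j]
--
--             if c not in s:
--                 res.append(-1)
--                 break
--
--             count += keym[c]
--
--         else:
--             res.append(count)
--
--     return res
-- ===== SOURCE B (Python) =====
-- def solution(keymap, targets):
--     def char_cost(c):
--         hits = [w.index(c) + 1 for w in keymap if c in w]
--         return min(hits) if hits else None
--
--     def score(t):
--         total = 0
--         for c in t:
--             p = char_cost(c)
--             if p is None:
--                 return -1
--             total += p
--         return total
--
--     return [score(t) for t in targets]
-- ===== Notes on version B (the rewrite author's own statement) =====
-- stated objective: alternative
-- what changed: B drops A's precomputed character set and min-position dict entirely: each target character's cost is computed on demand as min(w.index(c)+1 over the keymap words containing c) by scanning keymap directly, trading A's three staged precomputation/lookup passes for a query-time scan with no auxiliary state.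
import Mathlib
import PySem

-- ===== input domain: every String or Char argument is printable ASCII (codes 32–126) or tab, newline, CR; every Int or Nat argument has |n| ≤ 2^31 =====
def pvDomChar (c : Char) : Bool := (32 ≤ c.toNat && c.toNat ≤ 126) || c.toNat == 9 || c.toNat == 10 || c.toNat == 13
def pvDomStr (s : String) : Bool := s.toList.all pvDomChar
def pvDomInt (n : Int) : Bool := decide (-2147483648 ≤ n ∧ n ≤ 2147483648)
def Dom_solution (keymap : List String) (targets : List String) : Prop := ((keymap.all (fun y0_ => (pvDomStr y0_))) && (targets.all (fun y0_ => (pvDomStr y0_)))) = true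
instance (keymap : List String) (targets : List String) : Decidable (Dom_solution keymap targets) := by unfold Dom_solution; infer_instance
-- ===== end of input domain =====

-- B drops A's precomputed set and min-position dict entirely: each target character's cost is
-- computed on demand as min(w.index(c)+1 over the words containing c) by scanning keymap directly
-- (objective: simpler — no precomputation passes, no dict/set state).

-- ===== PORT A =====
-- the set- and dict-building passes: literal index loops via pyRange + pyGetD
def buildS_A (keymap : List String) : PySem.Set Char :=
  keymap.foldl (fun s w =>
    (PySem.List.pyRange 0 (PySem.List.len w.toList) 1).foldl
      (fun s j => PySem.Set.add s (PySem.List.pyGetD w.toList j ' ')) s)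
    PySem.Set.empty

def buildKeym_A (keymap : List String) : PySem.Dict Char Int :=
  keymap.foldl (fun d w =>
    (PySem.List.pyRange 0 (PySem.List.len w.toList) 1).foldl
      (fun d j =>
        let c := PySem.List.pyGetD w.toList j ' '
        if d.contains c then d.insert c (min (d.getD c 0) (j + 1))
        else d.insert c (j + 1)) d)
    PySem.Dict.empty

-- the inner target loop with its break: structural recursion over the target's characters.
-- keym[c] is ported as getD c 0: exact because the loop only reaches it when c ∈ s, and s
-- and keym are built from the same characters, so c is then a key of keym (never a KeyError).
def targetLoop_A (s : PySem.Set Char) (keym : PySem.Dict Char Int) : List Char → Int → Int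
  | [], count => count
  | c :: cs, count =>
    if ¬ (PySem.Set.contains s c) then -1
    else targetLoop_A s keym cs (count + keym.getD c 0)

def solution (keymap : List String) (targets : List String) : List Int :=
  let s := buildS_A keymap
  let keym := buildKeym_A keymap
  targets.foldl (fun res t => res ++ [targetLoop_A s keym t.toList 0]) []

-- ===== PORT B =====
-- `[w.index(c) + 1 for w in keymap if c in w]` then `min(hits) if hits else None`:
-- for a 1-char needle, `c in w` ↔ index? is some and str.index(c) = the char's first index,
-- so the guarded comprehension is exactly this filterMap; `min`/emptiness is min?.
def charCost_B (keymap : List String) (c : Char) : Option Int :=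
  let hits := keymap.filterMap (fun w => (PySem.List.index? w.toList c).map (fun (i : Nat) => (i : Int) + 1))
  PySem.List.min? hits (fun x => x)

-- B's `score`: early `return -1` on a missing character
def score_B (keymap : List String) : List Char → Int → Int
  | [], total => total
  | c :: cs, total =>
    match charCost_B keymap c with
    | none => -1
    | some p => score_B keymap cs (total + p)

def solution_alt (keymap : List String) (targets : List String) : List Int :=
  targets.map (fun t => score_B keymap t.toList 0)

-- ===== PRECONDITION & SPEC =====
def Spec_solution (keymap : List String) (targets : List String) (out : List Int) : Prop := out = solution_alt keymap targets
instance (keymap : List String) (targets : List String) (out : List Int) : Decidable (Spec_solution keymap targets out) := by unfold Spec_solution; infer_instance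

-- ===== CLAIM (what is proved, stated in full; the proofs are below) =====
def Claim_equal_solution : Prop := ∀ (keymap : List String) (targets : List String), Dom_solution keymap targets → Spec_solution keymap targets (solution keymap targets)

-- ===== LEMMAS AND PROOFS =====

-- proof-only helper: the min-position dict built by foldl over enumerated words
def minD (keymap : List String) : PySem.Dict Char Int :=
  keymap.foldl (fun d w =>
    (PySem.List.enumerate w.toList 0).foldl
      (fun d q => d.insert q.2 (min (d.getD q.2 (q.1 + 1)) (q.1 + 1))) d)
    PySem.Dict.empty

-- option-min used to characterise the dict entry at one key
def omin : Option Int → Option Int → Option Int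
  | none, b => b
  | some v, none => some v
  | some v, some u => some (min v u)

-- A's keym-building pass computes minD
theorem keym_eq (keymap : List String) : buildKeym_A keymap = minD keymap := by
  unfold buildKeym_A minD
  congr 1
  funext d0 w
  rw [PySem.List.enumerate_eq_map_pyRange w.toList ' ', List.foldl_map]
  congr 1
  funext d j
  by_cases h : d.contains (PySem.List.pyGetD w.toList j ' ')
  · obtain ⟨v, hv⟩ := Option.isSome_iff_exists.mp ((PySem.Dict.contains_eq_isSome_get? d _) ▸ h)
    simp [h, PySem.Dict.getD_of_get?_eq_some _ _ hv]
  · simp [h, PySem.Dict.getD_of_not_contains _ _ (by simpa using h)]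

-- A's set s holds exactly the keys of the dict
theorem s_eq_keys (keymap : List String) : buildS_A keymap = (minD keymap).keys := by
  unfold buildS_A minD
  suffices h : ∀ (d : PySem.Dict Char Int),
      (keymap.foldl (fun d w =>
        (PySem.List.enumerate w.toList 0).foldl
          (fun d q => d.insert q.2 (min (d.getD q.2 (q.1 + 1)) (q.1 + 1))) d) d).keys
      = keymap.foldl (fun s w =>
          (PySem.List.pyRange 0 (PySem.List.len w.toList) 1).foldl
            (fun s j => PySem.Set.add s (PySem.List.pyGetD w.toList j ' ')) s) d.keys by
    exact (h PySem.Dict.empty).symm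
  intro d
  induction keymap generalizing d with
  | nil => rfl
  | cons w km ih =>
    simp only [List.foldl_cons]
    rw [ih]
    congr 1
    rw [PySem.Dict.keys_foldl_insert_key (PySem.List.enumerate w.toList 0) (fun q => q.2)
          (fun d q => min (d.getD q.2 (q.1 + 1)) (q.1 + 1)) d,
        PySem.List.map_snd_enumerate]
    exact (PySem.List.foldl_pyRange_zero_pyGetD' w.toList ' ' PySem.Set.add d.keys).symm

-- rfl facts about omin (kept as named lemmas so simp never unfolds omin inside a lambda)
theorem omin_none_left (b : Option Int) : omin none b = b := by cases b <;> rfl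
theorem omin_some_none (v : Int) : omin (some v) none = some v := rfl
theorem omin_some_some (v u : Int) : omin (some v) (some u) = some (min v u) := rfl

-- one word's pass: the entry at c becomes omin(old, first index of c + shift + 1)
theorem word_get? (c : Char) (w : List Char) (n : Int) (d : PySem.Dict Char Int) :
    ((PySem.List.enumerate w n).foldl
      (fun d q => d.insert q.2 (min (d.getD q.2 (q.1 + 1)) (q.1 + 1))) d).get? c
    = omin (d.get? c) ((PySem.List.index? w c).map (fun (i : Nat) => n + (i : Int) + 1)) := by
  induction w generalizing n d with
  | nil =>
    rw [PySem.List.enumerate_nil]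
    simp only [List.foldl_nil, PySem.List.index?_eq_idxOf?, List.idxOf?_nil, Option.map_none]
    cases hd : d.get? c <;> rfl
  | cons x xs ih =>
    rw [PySem.List.enumerate_cons, List.foldl_cons]
    dsimp only
    by_cases hx : x = c
    · subst hx
      rw [ih (n + 1)]
      rw [PySem.List.index?_cons_self]
      simp only [PySem.Dict.get?_insert_self]
      cases hdc : d.get? x with
      | none =>
        have hnc : d.contains x = false := by
          rw [PySem.Dict.contains_eq_isSome_get?, hdc]; rfl
        rw [PySem.Dict.getD_of_not_contains _ _ hnc, omin_none_left]
        cases hidx : PySem.List.index? xs x with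
        | none =>
          simp only [Option.map_none, Option.map_some, omin_some_none]
          congr 1; omega
        | some i =>
          simp only [Option.map_some, omin_some_some]
          congr 1; omega
      | some v =>
        rw [PySem.Dict.getD_of_get?_eq_some _ _ hdc]
        cases hidx : PySem.List.index? xs x with
        | none =>
          simp only [Option.map_none, Option.map_some, omin_some_none, omin_some_some]
          congr 1; omega
        | some i =>
          simp only [Option.map_some, omin_some_some]
          congr 1; omega
    · rw [ih (n + 1)]
      rw [PySem.Dict.get?_insert_of_ne _ _ (fun h => hx h.symm),
          PySem.List.index?_cons_of_ne xs hx]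
      congr 1
      cases PySem.List.index? xs c with
      | none => rfl
      | some i =>
        simp only [Option.map_some]
        congr 1
        push_cast
        ring

-- per-word occurrence value used by B
def wOcc (c : Char) (w : String) : Option Int :=
  (PySem.List.index? w.toList c).map (fun (i : Nat) => (i : Int) + 1)

-- folding omin over some v is folding min over the hits
theorem foldl_omin_some (c : Char) (km : List String) (v : Int) :
    km.foldl (fun a w => omin a (wOcc c w)) (some v)
      = some ((km.filterMap (wOcc c)).foldl min v) := by
  induction km generalizing v with
  | nil => rfl
  | cons w km ih =>
    rw [List.foldl_cons]
    cases hw : wOcc c w with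
    | none => rw [omin_some_none, List.filterMap_cons_none hw]; exact ih v
    | some u =>
      rw [omin_some_some, List.filterMap_cons_some hw, List.foldl_cons]
      exact ih (min v u)

-- folding omin from none is B's min over the hits
theorem foldl_omin_none (c : Char) (km : List String) :
    km.foldl (fun a w => omin a (wOcc c w)) none
      = PySem.List.min? (km.filterMap (wOcc c)) (fun x => x) := by
  cases km with
  | nil => rfl
  | cons w km =>
    rw [List.foldl_cons]
    cases hw : wOcc c w with
    | none =>
      rw [omin_none_left, List.filterMap_cons_none hw]
      exact foldl_omin_none c km
    | some u =>
      rw [omin_none_left, List.filterMap_cons_some hw, foldl_omin_some,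
          PySem.List.min?_id_cons]

-- the whole dict: the entry at c is B's on-demand char cost
theorem minD_get? (keymap : List String) (c : Char) :
    (minD keymap).get? c = charCost_B keymap c := by
  have hcc : charCost_B keymap c
      = PySem.List.min? (keymap.filterMap (wOcc c)) (fun x => x) := rfl
  rw [hcc, ← foldl_omin_none]
  clear hcc
  unfold minD
  suffices h : ∀ (d : PySem.Dict Char Int),
      (keymap.foldl (fun d w =>
        (PySem.List.enumerate w.toList 0).foldl
          (fun d q => d.insert q.2 (min (d.getD q.2 (q.1 + 1)) (q.1 + 1))) d) d).get? c
      = keymap.foldl (fun a w => omin a (wOcc c w)) (d.get? c) by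
    exact h PySem.Dict.empty
  intro d
  induction keymap generalizing d with
  | nil => rfl
  | cons w km ih =>
    rw [List.foldl_cons, List.foldl_cons]
    rw [ih, word_get? c w.toList 0 d]
    congr 1
    unfold wOcc
    cases PySem.List.index? w.toList c with
    | none => rfl
    | some i =>
      simp only [Option.map_some, Int.zero_add]

-- membership in a dict's keys, read as a Set
theorem keys_contains (d : PySem.Dict Char Int) (c : Char) :
    PySem.Set.contains d.keys c = d.contains c := by
  rw [PySem.Dict.contains_eq_decide_mem_keys]
  simp

-- the break/else loop equals B's score loop
theorem targetLoop_eq (keymap : List String) (cs : List Char) (count : Int) :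
    targetLoop_A (minD keymap).keys (minD keymap) cs count = score_B keymap cs count := by
  induction cs generalizing count with
  | nil => simp [targetLoop_A, score_B]
  | cons c cs ih =>
    rw [targetLoop_A, score_B]
    cases hc : (minD keymap).get? c with
    | none =>
      have hb : (minD keymap).contains c = false := by
        rw [PySem.Dict.contains_eq_isSome_get?, hc]; rfl
      simp only [keys_contains, hb]
      rw [← minD_get?, hc]
      simp
    | some v =>
      have hb : (minD keymap).contains c = true := by
        rw [PySem.Dict.contains_eq_isSome_get?, hc]; rfl
      rw [PySem.Dict.getD_of_get?_eq_some _ _ hc]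
      simp only [keys_contains, hb]
      rw [if_neg (by simp), ← minD_get?, hc, ih]

-- ===== VERDICT (by name: the statement is the Claim_ definition above) =====
theorem solution_spec : Claim_equal_solution := by
  intro keymap targets _
  unfold Spec_solution solution solution_alt
  rw [keym_eq, s_eq_keys, PySem.List.foldl_append_singleton_eq_map]
  simp only [List.nil_append]
  exact List.map_congr_left (fun t _ => targetLoop_eq keymap t.toList 0)
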